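-- pv_equiv track=rewrite | github.com/mckib2/ssfp | ssfp/bssfp.py | _result_shape
-- ===== SOURCE A (Python) =====
-- from typing import Union, List, Tuple, Dict
--
-- def _result_shape(arg_shapes: List[Tuple[int, ...]]) -> Tuple[Tuple[int, ...], Dict[Tuple[int, ...], int]]:
--     if not arg_shapes:
--         return tuple(), dict()
--
--     unique_shapes = []
--     for sh in arg_shapes:
--         if sh not in unique_shapes:
--             unique_shapes.append(sh)
--
--     result_dict = dict()
--     result_sh = []
--     idx = 0
--     for sh in unique_shapes:
--         result_sh += list(sh)
--         result_dict[sh] = idx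
--         idx += len(sh)
--
--     return tuple(result_sh), result_dict
-- ===== SOURCE B (Python) =====
-- from typing import Union, List, Tuple, Dict
--
-- def _result_shape(arg_shapes: List[Tuple[int, ...]]) -> Tuple[Tuple[int, ...], Dict[Tuple[int, ...], int]]:
--     unique = list(dict.fromkeys(arg_shapes))
--     result_sh = tuple(x for sh in unique for x in sh)
--     offsets = [sum(map(len, unique[:i])) for i in range(len(unique))]
--     result_dict = dict(zip(unique, offsets))
--     return result_sh, result_dict
-- ===== Notes on version B (the rewrite author's own statement) =====
-- stated objective: simpler
-- what changed: Replaces the membership-scan dedup loop and the accumulator-threaded offset loop with dict.fromkeys dedup, a prefix-sum offset table zipped onto the unique shapes, and a flattening comprehension; no empty-input special case.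
import Mathlib
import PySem

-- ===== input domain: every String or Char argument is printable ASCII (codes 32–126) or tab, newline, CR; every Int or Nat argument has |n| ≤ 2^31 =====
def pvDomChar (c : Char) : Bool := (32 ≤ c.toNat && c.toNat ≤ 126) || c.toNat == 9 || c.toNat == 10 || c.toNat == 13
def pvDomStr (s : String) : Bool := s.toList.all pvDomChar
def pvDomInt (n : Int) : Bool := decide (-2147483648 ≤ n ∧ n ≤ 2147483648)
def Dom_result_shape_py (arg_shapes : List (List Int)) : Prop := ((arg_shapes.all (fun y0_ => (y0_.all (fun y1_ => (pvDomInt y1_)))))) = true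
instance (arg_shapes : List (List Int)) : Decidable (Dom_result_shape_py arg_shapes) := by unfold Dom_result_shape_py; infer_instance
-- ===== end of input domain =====

-- B replaces A's two accumulator loops by an ordered dedup + prefix-sum offset table zipped
-- onto the unique shapes (objective: simpler; same return value).

-- ===== PORT A =====
def result_shape_py (arg_shapes : List (List Int)) : List Int × (List (List Int × Int)) :=
  if arg_shapes = [] then ([], [])
  else
    let unique_shapes := arg_shapes.foldl
      (fun acc sh => if acc.contains sh then acc else acc ++ [sh]) []
    let st := unique_shapes.foldl
      (fun (st : PySem.Dict (List Int) Int × List Int × Int) sh =>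
        (st.1.insert sh st.2.2, st.2.1 ++ sh, st.2.2 + (sh.length : Int)))
      (PySem.Dict.empty, [], 0)
    (st.2.1, st.1.items)

-- ===== PORT B =====
def result_shape_py_alt (arg_shapes : List (List Int)) : List Int × (List (List Int × Int)) :=
  let unique := PySem.List.dedup arg_shapes          -- list(dict.fromkeys(arg_shapes))
  let result_sh := unique.flatMap (fun sh => sh)     -- tuple(x for sh in unique for x in sh)
  let offsets := (List.range unique.length).map      -- [sum(map(len, unique[:i])) for i in range(len(unique))]
    (fun i => ((unique.take i).map (fun sh => (sh.length : Int))).sum)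
  -- dict(zip(unique, offsets)): unique has no duplicate shapes, so the dict's items are exactly these pairs
  let result_dict := unique.zip offsets
  (result_sh, result_dict)

-- ===== PRECONDITION & SPEC =====
def Spec_result_shape_py (arg_shapes : List (List Int)) (out : List Int × (List (List Int × Int))) : Prop := out = result_shape_py_alt arg_shapes
instance (arg_shapes : List (List Int)) (out : List Int × (List (List Int × Int))) : Decidable (Spec_result_shape_py arg_shapes out) := by unfold Spec_result_shape_py; infer_instance

-- ===== CLAIM (what is proved, stated in full; the proofs are below) =====
def Claim_equal_result_shape_py : Prop := ∀ (arg_shapes : List (List Int)), Dom_result_shape_py arg_shapes → Spec_result_shape_py arg_shapes (result_shape_py arg_shapes)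

-- ===== LEMMAS AND PROOFS =====

/-- Pairs (shape, running offset) starting from offset `i`. -/
def ppairs (i : Int) : List (List Int) → List (List Int × Int)
  | [] => []
  | sh :: u => (sh, i) :: ppairs (i + (sh.length : Int)) u

/-- A's second loop: the dict's items append `ppairs i u` and the shape list appends the flatten. -/
lemma loopA_eq (u : List (List Int)) : ∀ (d : PySem.Dict (List Int) Int) (r : List Int) (i : Int),
    u.Nodup → (∀ sh ∈ u, d.contains sh = false) →
    (u.foldl (fun (st : PySem.Dict (List Int) Int × List Int × Int) sh =>
        (st.1.insert sh st.2.2, st.2.1 ++ sh, st.2.2 + (sh.length : Int))) (d, r, i)).1.items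
      = d.items ++ ppairs i u ∧
    (u.foldl (fun (st : PySem.Dict (List Int) Int × List Int × Int) sh =>
        (st.1.insert sh st.2.2, st.2.1 ++ sh, st.2.2 + (sh.length : Int))) (d, r, i)).2.1
      = r ++ u.flatMap (fun sh => sh) := by
  induction u with
  | nil => intro d r i _ _; simp [ppairs]
  | cons sh u ih =>
    intro d r i hnd hfr
    simp only [List.foldl_cons]
    have hsh : d.contains sh = false := hfr sh (by simp)
    have hfr' : ∀ s ∈ u, (d.insert sh i).contains s = false := by
      intro s hs
      have hne : s ≠ sh := by
        rintro rfl; exact (List.nodup_cons.mp hnd).1 hs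
      rw [PySem.Dict.contains_insert]
      simp [hne, hfr s (by simp [hs])]
    have := ih (d.insert sh i) (r ++ sh) (i + (sh.length : Int))
      (List.nodup_cons.mp hnd).2 hfr'
    rcases this with ⟨h1, h2⟩
    constructor
    · rw [h1, PySem.Dict.items_insert, hsh, ppairs]
      simp
    · rw [h2]; simp

/-- B's zip of the prefix-sum table, shifted by `i`, is `ppairs i u`. -/
lemma zip_offsets_eq (u : List (List Int)) : ∀ (i : Int),
    u.zip ((List.range u.length).map
      (fun j => i + ((u.take j).map (fun sh => (sh.length : Int))).sum)) = ppairs i u := by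
  induction u with
  | nil => intro i; simp [ppairs]
  | cons sh u ih =>
    intro i
    rw [List.length_cons, List.range_succ_eq_map]
    simp only [List.map_cons, List.map_map, List.take_zero, List.map_nil, List.sum_nil,
      List.zip_cons_cons, ppairs, add_zero]
    congr 1
    rw [← ih (i + (sh.length : Int))]
    congr 1
    apply List.map_congr_left
    intro j _
    simp [List.take_succ_cons, add_assoc]

/-- A's first loop is the ordered dedup. -/
lemma dedupA_eq (xs : List (List Int)) :
    xs.foldl (fun acc sh => if acc.contains sh then acc else acc ++ [sh]) []
      = PySem.List.dedup xs := by
  rw [PySem.List.dedup_eq_ofList, PySem.Set.ofList_eq_foldl]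
  rfl

-- ===== VERDICT (by name: the statement is the Claim_ definition above) =====
theorem result_shape_py_spec : Claim_equal_result_shape_py := by
  intro arg_shapes _
  unfold Spec_result_shape_py result_shape_py result_shape_py_alt
  by_cases h : arg_shapes = []
  · subst h; simp [PySem.List.dedup]
  · simp only [if_neg h, dedupA_eq]
    set u := PySem.List.dedup arg_shapes with hu
    have hnd : u.Nodup := by
      rw [hu, PySem.List.dedup_eq_ofList]; exact PySem.Set.nodup_ofList _
    have hfr : ∀ sh ∈ u, (PySem.Dict.empty : PySem.Dict (List Int) Int).contains sh = false := by
      intro sh _; exact PySem.Dict.contains_empty _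
    obtain ⟨h1, h2⟩ := loopA_eq u PySem.Dict.empty [] 0 hnd hfr
    refine Prod.ext ?_ ?_
    · simpa using h2
    · show _ = u.zip _
      have := zip_offsets_eq u 0
      simp only [zero_add] at this
      rw [this]
      simpa using h1
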